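-- pv_equiv track=rewrite | github.com/bautyacosta/actividad-2 | src/validar_nombre.py | validar
-- ===== SOURCE A (Python) =====
-- def validar(nombre):
--     if len(nombre) <5:
--         return "el nombre debe tener al menos 5 caracteres"
--     if not any(caracter.isdigit() for caracter in nombre):
--         return "el nombre debe contener al menos un número"
--     if not any(caracter.isupper() for caracter in nombre):
--         return "el nombre debe contener al menos una letra mayúscula"
--     if not nombre.isalnum():
--         return "el nombre solo puede contener letras y números"
--     return "nombre válido"
-- ===== SOURCE B (Python) =====
-- def validar(nombre):
--     if len(nombre) < 5:
--         return "el nombre debe tener al menos 5 caracteres"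
--     has_digit = False
--     has_upper = False
--     all_alnum = True
--     for c in nombre:
--         if c.isdigit():
--             has_digit = True
--         if c.isupper():
--             has_upper = True
--         if not c.isalnum():
--             all_alnum = False
--     if not has_digit:
--         return "el nombre debe contener al menos un número"
--     if not has_upper:
--         return "el nombre debe contener al menos una letra mayúscula"
--     if not all_alnum:
--         return "el nombre solo puede contener letras y números"
--     return "nombre válido"
-- ===== Notes on version B (the rewrite author's own statement) =====
-- stated objective: alternative
-- what changed: Replaces A's three separate whole-string scans (two any() generators and str.isalnum) by one fused pass maintaining has_digit/has_upper/all_alnum flags, checked afterwards in the same priority order.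
import Mathlib
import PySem

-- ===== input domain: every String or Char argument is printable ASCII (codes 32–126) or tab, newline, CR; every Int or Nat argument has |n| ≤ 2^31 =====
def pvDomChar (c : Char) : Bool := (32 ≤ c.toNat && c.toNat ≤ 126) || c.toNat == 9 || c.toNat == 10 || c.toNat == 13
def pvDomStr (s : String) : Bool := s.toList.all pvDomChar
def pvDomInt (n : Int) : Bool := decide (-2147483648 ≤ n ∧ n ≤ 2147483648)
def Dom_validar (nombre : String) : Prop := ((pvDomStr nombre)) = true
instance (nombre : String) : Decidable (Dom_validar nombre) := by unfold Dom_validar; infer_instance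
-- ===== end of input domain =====

-- B fuses A's three separate whole-string scans into one pass maintaining three flags (alternative decomposition).


-- ===== PORT A =====
def validar (nombre : String) : String :=
  if PySem.Str.len nombre < 5 then "el nombre debe tener al menos 5 caracteres"
  else if !(nombre.toList.any PySem.Chars.isdigit) then "el nombre debe contener al menos un número"
  else if !(nombre.toList.any PySem.Chars.isupper) then "el nombre debe contener al menos una letra mayúscula"
  else if !(PySem.Str.strIsalnum nombre) then "el nombre solo puede contener letras y números"
  else "nombre válido"

-- ===== PORT B =====
def validar_alt (nombre : String) : String :=
  if PySem.Str.len nombre < 5 then "el nombre debe tener al menos 5 caracteres"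
  else
    let flags := nombre.toList.foldl
      (fun (s : Bool × Bool × Bool) c =>
        (s.1 || PySem.Chars.isdigit c,
         s.2.1 || PySem.Chars.isupper c,
         s.2.2 && PySem.Chars.isalnum c))
      (false, false, true)
    if !flags.1 then "el nombre debe contener al menos un número"
    else if !flags.2.1 then "el nombre debe contener al menos una letra mayúscula"
    else if !flags.2.2 then "el nombre solo puede contener letras y números"
    else "nombre válido"

-- ===== PRECONDITION & SPEC =====
def Spec_validar (nombre : String) (out : String) : Prop := out = validar_alt nombre
instance (nombre : String) (out : String) : Decidable (Spec_validar nombre out) := by unfold Spec_validar; infer_instance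

-- ===== CLAIM =====
def Claim_equal_validar : Prop := ∀ (nombre : String), Dom_validar nombre → Spec_validar nombre (validar nombre)

-- ===== LEMMAS AND PROOFS =====
lemma validar_flags (l : List Char) (d u a : Bool) :
    l.foldl
      (fun (s : Bool × Bool × Bool) c =>
        (s.1 || PySem.Chars.isdigit c,
         s.2.1 || PySem.Chars.isupper c,
         s.2.2 && PySem.Chars.isalnum c))
      (d, u, a)
    = (d || l.any PySem.Chars.isdigit, u || l.any PySem.Chars.isupper, a && l.all PySem.Chars.isalnum) := by
  induction l generalizing d u a with
  | nil => simp
  | cons c t ih => simp [ih, Bool.or_assoc, Bool.and_assoc]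

-- ===== VERDICT =====
theorem validar_spec : Claim_equal_validar := by
  intro nombre _
  unfold Spec_validar validar validar_alt
  split
  · rfl
  · rename_i hlen
    simp only [validar_flags, Bool.false_or, Bool.true_and]
    have hne : nombre.toList ≠ [] := by
      intro h
      simp [PySem.Str.len, h] at hlen
    simp [PySem.Str.strIsalnum, PySem.Chars.strIsalnum, List.isEmpty_iff, hne]
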